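-- pv_equiv track=rewrite | github.com/neerajsinghjr/dsa | neetcode/01_array_and_hashing/p005_is_subsequence.py | ansv2
-- ===== SOURCE A (Python) =====
-- def ansv2(s, t):
--     """
--     _run: rejected
--     _code: ts: o(n), sc: o(n)
--     _study:
--     --- choke ---
--     [+] solution not working because using hashmap doesn't tip you
--     with respect to sequence it only helps you with the character
--     count which is only one aspect of the question.
--     --- explanation ---
--     [+] here intention is of using a hashmap to get the character
--     count of final string and then at search first string into the
--     second string.
--     """
--     hmap = {}
--     for c1 in t:
--         hmap[c1] = hmap.get(c1, 0) + 1
--     for c2 in s: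
--         if not hmap.get(c2):
--             return False
--         hmap[c2] -= 1
--     return True
-- ===== SOURCE B (Python) =====
-- def ansv2(s, t):
--     sl, tl = list(s), list(t)
--     return all(sl.count(c) <= tl.count(c) for c in set(sl))
-- ===== Notes on version B (the rewrite author's own statement) =====
-- stated objective: simpler
-- what changed: A builds a mutable count table of t and scans s decrementing with an early return; B builds no table at all and just checks count containment: for each distinct character of s, s counts no more copies than t, via list.count over set(s).
import Mathlib
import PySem

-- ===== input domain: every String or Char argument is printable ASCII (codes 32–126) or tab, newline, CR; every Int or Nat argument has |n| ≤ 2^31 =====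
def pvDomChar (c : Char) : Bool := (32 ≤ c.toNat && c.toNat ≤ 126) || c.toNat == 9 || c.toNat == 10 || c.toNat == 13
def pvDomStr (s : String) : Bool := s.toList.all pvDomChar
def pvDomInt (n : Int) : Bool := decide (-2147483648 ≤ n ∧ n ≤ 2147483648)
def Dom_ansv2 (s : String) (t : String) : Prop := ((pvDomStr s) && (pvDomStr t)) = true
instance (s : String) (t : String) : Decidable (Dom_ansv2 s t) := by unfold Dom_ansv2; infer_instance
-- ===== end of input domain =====

-- B builds no count table: it checks, for each distinct character of s, that s has no more copies of it than t.

-- ===== PORT A =====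
-- the 'for c2 in s' loop: `if not hmap.get(c2): return False` (falsy = missing key or count 0), then `hmap[c2] -= 1`
def ansv2Loop : PySem.Dict Char Int → List Char → Bool
  | _, [] => true
  | hmap, c2 :: rest =>
    if hmap.getD c2 0 = 0 then false
    else ansv2Loop (hmap.insert c2 (hmap.getD c2 0 - 1)) rest

def ansv2 (s : String) (t : String) : Bool :=
  let hmap := t.toList.foldl (fun d c1 => d.insert c1 (d.getD c1 0 + 1)) (PySem.Dict.empty)
  ansv2Loop hmap s.toList

-- ===== PORT B =====
def ansv2_alt (s : String) (t : String) : Bool :=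
  let sl := s.toList
  let tl := t.toList
  (PySem.Set.ofList sl).all (fun c => sl.count c ≤ tl.count c)

-- ===== PRECONDITION & SPEC =====
def Spec_ansv2 (s : String) (t : String) (out : Bool) : Prop := out = ansv2_alt s t
instance (s : String) (t : String) (out : Bool) : Decidable (Spec_ansv2 s t out) := by unfold Spec_ansv2; infer_instance

-- ===== CLAIM (what is proved, stated in full; the proofs are below) =====
def Claim_equal_ansv2 : Prop := ∀ (s : String) (t : String), Dom_ansv2 s t → Spec_ansv2 s t (ansv2 s t)

-- ===== LEMMAS AND PROOFS =====

-- A's scan-and-decrement loop succeeds iff every character's count in the remaining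
-- list fits in the dictionary's (nonnegative) remaining allowance.
theorem ansv2Loop_iff (l : List Char) (d : PySem.Dict Char Int)
    (hnn : ∀ c, 0 ≤ d.getD c 0) :
    ansv2Loop d l = true ↔ ∀ c, (l.count c : Int) ≤ d.getD c 0 := by
  induction l generalizing d with
  | nil => simp [ansv2Loop]; intro c; simpa using hnn c
  | cons c2 rest ih =>
    by_cases h0 : d.getD c2 0 = 0
    · simp only [ansv2Loop, h0, if_true]
      constructor
      · intro h; cases h
      · intro h
        have := h c2
        simp [h0] at this; omega
    · simp only [ansv2Loop, h0, if_false]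
      have hnn' : ∀ c, 0 ≤ (d.insert c2 (d.getD c2 0 - 1)).getD c 0 := by
        intro c
        rw [PySem.Dict.getD_insert]
        by_cases hc : c = c2
        · simp [hc]; have := hnn c2; omega
        · simp [hc]; exact hnn c
      rw [ih _ hnn']
      constructor
      · intro h c
        have hc := h c
        rw [PySem.Dict.getD_insert] at hc
        by_cases he : c = c2
        · subst he; simp at hc; simp; omega
        · have hne : c2 ≠ c := fun h => he h.symm
          simp [he] at hc; simp [hne]; exact hc
      · intro h c
        have hc := h c
        rw [PySem.Dict.getD_insert]
        by_cases he : c = c2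
        · subst he; simp at hc; simp; omega
        · have hne : c2 ≠ c := fun h => he h.symm
          simp [he]; simp [hne] at hc; exact hc

-- the builder loop over t yields exactly t's character counts
theorem ansv2_build_getD (t : List Char) (c : Char) :
    (t.foldl (fun d c1 => d.insert c1 (d.getD c1 0 + 1)) (PySem.Dict.empty)).getD c 0
      = (t.count c : Int) := by
  rw [PySem.Dict.getD_foldl_insert_add_one]
  simp [PySem.Dict.empty, PySem.Dict.getD, PySem.Dict.get?]

theorem ansv2_alt_iff (s t : String) :
    ansv2_alt s t = true ↔ ∀ c, (s.toList.count c : Int) ≤ (t.toList.count c : Int) := by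
  simp only [ansv2_alt, List.all_eq_true]
  constructor
  · intro h c
    by_cases hc : c ∈ s.toList
    · have := h c (by simpa [PySem.Set.mem_ofList] using hc)
      simp at this; exact_mod_cast this
    · simp [List.count_eq_zero_of_not_mem hc]
  · intro h c hc
    simpa using h c

-- ===== VERDICT (by name: the statement is the Claim_ definition above) =====
theorem ansv2_spec : Claim_equal_ansv2 := by
  intro s t _
  unfold Spec_ansv2
  have hA : ansv2 s t = true ↔ ∀ c, (s.toList.count c : Int) ≤ (t.toList.count c : Int) := by
    unfold ansv2
    rw [ansv2Loop_iff _ _ (fun c => by rw [ansv2_build_getD]; positivity)]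
    constructor <;> intro h c <;> simpa [ansv2_build_getD] using h c
  have hB := ansv2_alt_iff s t
  rw [← hB] at hA
  exact Bool.eq_iff_iff.mpr hA
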